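-- pv_equiv track=rewrite | github.com/rrrrrrri/fgt-gadgets | license_gadget/base license/patch.py | gen_regex_from_sig
-- ===== SOURCE A (Python) =====
-- def gen_regex_from_sig(code_pattern: str) -> str:
--     """
--     The gen_regex_from_sig function takes a code pattern and
--     converts it into a regular expression
--     :param code_pattern: code pattern
--     :return: regular expression
--     """
--     regex = ""
--     _split_sig = code_pattern.split()
--     i = 0
--     while True:
--         if i >= len(_split_sig):
--             break
--         if _split_sig[i] != "??":
--             regex += "\\x"
--             regex += _split_sig[i]
--             i += 1
--         elif _split_sig[i] == "??":
--             _dyn_byte_count = 1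
--             while True:
--                 i += 1
--                 if i >= len(_split_sig):
--                     break
--                 if _split_sig[i] == "??":
--                     _dyn_byte_count += 1
--                 else:
--                     break
--             regex += ".{%d}" % _dyn_byte_count
--     return regex
-- ===== SOURCE B (Python) =====
-- def _take_run(k, tokens):
--     """Longest prefix of tokens on which (t == "??") equals k, plus the rest."""
--     for j, t in enumerate(tokens):
--         if (t == "??") != k:
--             return tokens[:j], tokens[j:]
--     return tokens, []
--
--
-- def gen_regex_from_sig(code_pattern: str) -> str:
--     pieces = []
--     tokens = code_pattern.split()
--     while tokens:
--         k = tokens[0] == "??"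
--         run, tokens = _take_run(k, tokens)
--         if k:
--             pieces.append(".{%d}" % len(run))
--         else:
--             pieces.extend("\\x" + t for t in run)
--     return "".join(pieces)
-- ===== Notes on version B (the rewrite author's own statement) =====
-- stated objective: alternative
-- what changed: Replaces A's character-by-character cursor loop with nested manual run-counting by a group-at-a-time scan: split off each maximal run of equal kind (wildcard or byte) with a helper, render each run as one piece, and join the piece list at the end.
import Mathlib
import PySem

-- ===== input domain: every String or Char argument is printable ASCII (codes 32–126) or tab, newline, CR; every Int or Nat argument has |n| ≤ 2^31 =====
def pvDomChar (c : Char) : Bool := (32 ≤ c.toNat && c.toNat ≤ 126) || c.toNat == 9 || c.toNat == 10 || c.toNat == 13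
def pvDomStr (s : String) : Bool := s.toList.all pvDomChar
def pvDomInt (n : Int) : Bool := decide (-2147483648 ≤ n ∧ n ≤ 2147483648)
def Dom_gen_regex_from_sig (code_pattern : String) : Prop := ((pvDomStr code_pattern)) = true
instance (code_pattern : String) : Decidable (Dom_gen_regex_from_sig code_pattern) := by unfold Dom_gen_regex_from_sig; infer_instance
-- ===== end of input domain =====

-- B replaces A's index-cursor loop with nested '??'-counting by a group-at-a-time scan
-- (split off each maximal run of like tokens, render it as one piece, join the pieces):
-- an alternative decomposition of the same O(n) task.


-- ===== PORT A =====
-- A's inner while loop: count consecutive "??" tokens, return (count so far, remaining tokens)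
def pvCountA : List String → Nat → Nat × List String
  | [], n => (n, [])
  | t :: rest, n => if t = "??" then pvCountA rest (n + 1) else (n, t :: rest)

-- used only for termination of pvLoopA (the port cites it in decreasing_by)
theorem pvCountA_snd_le : ∀ (l : List String) (n : Nat), (pvCountA l n).2.length ≤ l.length
  | [], _ => Nat.le_refl _
  | t :: rest, n => by
    by_cases h : t = "??" <;> simp [pvCountA, h]
    exact Nat.le_succ_of_le (pvCountA_snd_le rest (n + 1))

-- A's outer while loop over the token list with the accumulated regex string
def pvLoopA : List String → String → String
  | [], regex => regex
  | t :: rest, regex =>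
    if t ≠ "??" then pvLoopA rest (regex ++ "\\x" ++ t)
    else
      let c := pvCountA rest 1
      pvLoopA c.2 (regex ++ (".{" ++ PySem.Int.toStr (c.1 : Int) ++ "}"))
termination_by l _ => l.length
decreasing_by
  · simp
  · exact Nat.lt_succ_of_le (pvCountA_snd_le rest 1)

def gen_regex_from_sig (code_pattern : String) : String :=
  pvLoopA (PySem.Str.split₀ code_pattern) ""

-- ===== PORT B =====
-- _take_run: longest prefix of tokens on which (t == "??") equals k, plus the rest
def pvTakeRun (k : Bool) : List String → List String × List String
  | [] => ([], [])
  | t :: rest =>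
    if (t == "??") ≠ k then ([], t :: rest)
    else
      let p := pvTakeRun k rest
      (t :: p.1, p.2)

-- used only for termination of pvPieces (cited in decreasing_by)
theorem pvTakeRun_snd_le : ∀ (k : Bool) (l : List String), (pvTakeRun k l).2.length ≤ l.length
  | _, [] => Nat.le_refl _
  | k, t :: rest => by
    by_cases h : (t == "??") = k <;> simp [pvTakeRun, h]
    exact Nat.le_succ_of_le (pvTakeRun_snd_le k rest)

-- B's while loop: split off one maximal run, turn it into its piece(s), recurse on the rest
def pvPieces : List String → List String
  | [] => []
  | t :: rest =>
    let k := t == "??"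
    let p := pvTakeRun k (t :: rest)
    (if k then [".{" ++ PySem.Int.toStr (p.1.length : Int) ++ "}"]
     else p.1.map (fun u => "\\x" ++ u)) ++ pvPieces p.2
termination_by l => l.length
decreasing_by
  simp only [pvTakeRun, ne_eq, not_true_eq_false, not_false_eq_true, if_neg]
  exact Nat.lt_succ_of_le (pvTakeRun_snd_le (t == "??") rest)

def gen_regex_from_sig_alt (code_pattern : String) : String :=
  PySem.Str.join "" (pvPieces (PySem.Str.split₀ code_pattern))

-- ===== PRECONDITION & SPEC =====
def Spec_gen_regex_from_sig (code_pattern : String) (out : String) : Prop := out = gen_regex_from_sig_alt code_pattern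
instance (code_pattern : String) (out : String) : Decidable (Spec_gen_regex_from_sig code_pattern out) := by unfold Spec_gen_regex_from_sig; infer_instance

-- ===== CLAIM (what is proved, stated in full; the proofs are below) =====
def Claim_equal_gen_regex_from_sig : Prop := ∀ (code_pattern : String), Dom_gen_regex_from_sig code_pattern → Spec_gen_regex_from_sig code_pattern (gen_regex_from_sig code_pattern)

-- ===== LEMMAS AND PROOFS =====

-- ''.join over a cons, on the character-list side
theorem pvJoin_empty_cons (p : String) (ps : List String) :
    (PySem.Str.join "" (p :: ps)).toList = p.toList ++ (PySem.Str.join "" ps).toList := by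
  cases ps with
  | nil => simp [PySem.Str.toList_join, PySem.Chars.join, List.intercalate]
  | cons q ps' => simp [PySem.Str.toList_join, PySem.Chars.join_cons_cons]

-- pvCountA is pvTakeRun true plus an offset
theorem pvCountA_eq_takeRun : ∀ (l : List String) (n : Nat),
    pvCountA l n = (n + (pvTakeRun true l).1.length, (pvTakeRun true l).2) := by
  intro l
  induction l with
  | nil => intro n; simp [pvCountA, pvTakeRun]
  | cons t rest ih =>
    intro n
    by_cases h : t = "??"
    · simp [pvCountA, pvTakeRun, h, ih (n + 1)]
      omega
    · simp [pvCountA, pvTakeRun, h]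

-- rendering a non-wildcard run token-by-token equals rendering the rest group-wise
theorem pvRun_false_pieces : ∀ (rest : List String),
    ((pvTakeRun false rest).1.map (fun u => "\\x" ++ u)) ++ pvPieces (pvTakeRun false rest).2
      = pvPieces rest := by
  intro rest
  induction rest with
  | nil => simp [pvTakeRun, pvPieces]
  | cons u rest' ih =>
    by_cases h : u = "??"
    · simp [pvTakeRun, h]
    · have hk : (u == "??") = false := by simp [h]
      rw [pvPieces]
      simp [pvTakeRun, hk]

-- the main loop invariant: A's loop appends exactly the joined pieces of B
theorem pvLoopA_eq_pieces : ∀ (n : Nat) (toks : List String), toks.length ≤ n →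
    ∀ acc, (pvLoopA toks acc).toList = acc.toList ++ (PySem.Str.join "" (pvPieces toks)).toList := by
  intro n
  induction n with
  | zero =>
    intro toks h acc
    have : toks = [] := List.eq_nil_of_length_eq_zero (Nat.le_zero.mp h)
    subst this
    simp [pvLoopA, pvPieces, PySem.Str.toList_join, PySem.Chars.join, List.intercalate]
  | succ n ih =>
    intro toks h acc
    cases toks with
    | nil => simp [pvLoopA, pvPieces, PySem.Str.toList_join, PySem.Chars.join, List.intercalate]
    | cons t rest =>
      by_cases ht : t = "??"
      · subst ht
        rw [pvLoopA, pvPieces]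
        simp only [ne_eq, not_true_eq_false, if_false]
        rw [pvCountA_eq_takeRun]
        have hlen : (pvTakeRun true rest).2.length ≤ n :=
          Nat.le_trans (pvTakeRun_snd_le true rest) (Nat.succ_le_succ_iff.mp h)
        rw [ih _ hlen]
        have hrun : pvTakeRun ("??" == "??" : Bool) ("??" :: rest)
            = ("??" :: (pvTakeRun true rest).1, (pvTakeRun true rest).2) := by
          simp [pvTakeRun]
        simp only [hrun]
        have hc : ((1 + (pvTakeRun true rest).1.length : Nat) : Int)
            = ((("??" :: (pvTakeRun true rest).1).length : Nat) : Int) := by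
          simp [Nat.add_comm]
        rw [hc, if_pos (by decide), List.singleton_append, pvJoin_empty_cons]
        simp [List.append_assoc]
      · rw [pvLoopA, pvPieces]
        simp only [ne_eq, ht, not_false_eq_true, if_true]
        have hlen : rest.length ≤ n := Nat.succ_le_succ_iff.mp h
        rw [ih _ hlen]
        have hk : (t == "??") = false := by simp [ht]
        simp only [hk]
        have hrun : pvTakeRun false (t :: rest)
            = (t :: (pvTakeRun false rest).1, (pvTakeRun false rest).2) := by
          rw [pvTakeRun]; simp [hk]
        rw [hrun]
        simp only [if_neg (by decide : ¬(false = true)), List.map_cons, List.cons_append]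
        rw [pvRun_false_pieces, pvJoin_empty_cons]
        simp [List.append_assoc]

-- ===== VERDICT (by name: the statement is the Claim_ definition above) =====
theorem gen_regex_from_sig_spec : Claim_equal_gen_regex_from_sig := by
  intro cp _
  unfold Spec_gen_regex_from_sig gen_regex_from_sig gen_regex_from_sig_alt
  apply String.toList_inj.mp
  rw [pvLoopA_eq_pieces (PySem.Str.split₀ cp).length _ (Nat.le_refl _) ""]
  simp
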